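-- pv_equiv track=rewrite | github.com/s-hisham-gh/AI-Fundamentals | task2/p5.py | locate_players
-- ===== SOURCE A (Python) =====
-- def locate_players(board_layout):
--     pacman_loc, ghost_loc = (0, 0), [(-1, -1)]*4
--     ghost_map = {'W': 0, 'X': 1, 'Y': 2, 'Z': 3}
--     for row_idx, row in enumerate(board_layout):
--         for col_idx, cell in enumerate(row):
--             if cell[0] == 'P':
--                 pacman_loc = (row_idx, col_idx)
--             if cell[0] in ghost_map.keys():
--                 ghost_loc[ghost_map[cell[0]]] = (row_idx, col_idx)
--     while (-1, -1) in ghost_loc: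
--         ghost_loc.remove((-1, -1))
--     return pacman_loc, ghost_loc
-- ===== SOURCE B (Python) =====
-- def locate_players(board_layout):
--     def find_last(letter):
--         # first match in reverse traversal order = last match in forward order
--         for r, row in reversed(list(enumerate(board_layout))):
--             for c, cell in reversed(list(enumerate(row))):
--                 if cell[0] == letter:
--                     return (r, c)
--         return None
--     p = find_last('P')
--     ghosts = [find_last(g) for g in 'WXYZ']
--     return (p if p is not None else (0, 0)), [g for g in ghosts if g is not None]
-- ===== Notes on version B (the rewrite author's own statement) =====
-- stated objective: alternative
-- what changed: B replaces A's single stateful forward scan (preallocated sentinel list, letter-to-index map, while-remove cleanup) by five independent backward searches with early exit: for each of P,W,X,Y,Z it returns the first match of a reverse traversal (= A's last-write-wins), assembling the ghost list from the found ones in W,X,Y,Z order.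
import Mathlib
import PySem

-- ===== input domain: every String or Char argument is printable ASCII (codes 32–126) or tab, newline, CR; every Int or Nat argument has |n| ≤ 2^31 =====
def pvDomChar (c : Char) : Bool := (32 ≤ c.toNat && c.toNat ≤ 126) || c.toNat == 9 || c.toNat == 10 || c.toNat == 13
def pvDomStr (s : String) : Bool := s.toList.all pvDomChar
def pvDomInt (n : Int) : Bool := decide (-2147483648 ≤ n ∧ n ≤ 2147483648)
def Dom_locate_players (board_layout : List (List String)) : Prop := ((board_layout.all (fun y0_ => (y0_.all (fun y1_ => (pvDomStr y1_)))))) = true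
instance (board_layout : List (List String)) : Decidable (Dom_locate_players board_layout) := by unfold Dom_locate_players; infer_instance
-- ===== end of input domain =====

-- B replaces A's single stateful forward scan (sentinel list + letter-to-index map + while-remove
-- cleanup) by five independent backward searches with early exit, one per letter P,W,X,Y,Z.

-- ===== PORT A =====

-- cell[0] : none = IndexError on an empty cell, excluded by Pre_; the default is never used there
def lpCell (cell : String) : Char := (PySem.Str.pyGet? cell 0).getD ' '

def lpGhostMap : PySem.Dict Char Int := PySem.Dict.ofList [('W', 0), ('X', 1), ('Y', 2), ('Z', 3)]

-- the body of the inner for-loop of A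
def lpStepA (r : Int) (st : (Int × Int) × List (Int × Int)) (cp : Int × String) :
    (Int × Int) × List (Int × Int) :=
  let c := lpCell cp.2
  let pac := if c = 'P' then (r, cp.1) else st.1
  let gl := if lpGhostMap.contains c then PySem.List.pySetD st.2 (lpGhostMap.getD c 0) (r, cp.1) else st.2
  (pac, gl)

-- 'while (-1,-1) in ghost_loc: ghost_loc.remove((-1,-1))' (list.remove = erase the first occurrence)
def lpRemoveLoop (l : List (Int × Int)) : List (Int × Int) :=
  if ((-1 : Int), (-1 : Int)) ∈ l then lpRemoveLoop (l.erase ((-1 : Int), (-1 : Int))) else l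
termination_by l.length
decreasing_by
  rename_i h
  have h1 := List.length_erase_of_mem h
  have h2 := List.length_pos_of_mem h
  omega

def locate_players (board_layout : List (List String)) : (Int × Int) × (List (Int × Int)) :=
  let st := (PySem.List.enumerate board_layout).foldl
      (fun st rp => (PySem.List.enumerate rp.2).foldl (lpStepA rp.1) st)
      ((0, 0), [(-1, -1), (-1, -1), (-1, -1), (-1, -1)])
  (st.1, lpRemoveLoop st.2)

-- ===== PORT B =====

-- inner loop of find_last: 'for c, cell in reversed(list(enumerate(row)))' (caller passes the reversed list)
def lpFindInRow (letter : Char) (r : Int) : List (Int × String) → Option (Int × Int)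
  | [] => none
  | (c, cell) :: tl => if lpCell cell = letter then some (r, c) else lpFindInRow letter r tl

-- outer loop of find_last: 'for r, row in reversed(list(enumerate(board_layout)))'
def lpFindInRows (letter : Char) : List (Int × List String) → Option (Int × Int)
  | [] => none
  | (r, row) :: tl =>
    match lpFindInRow letter r (PySem.List.enumerate row).reverse with
    | some p => some p
    | none => lpFindInRows letter tl

def lpFindLast (letter : Char) (board : List (List String)) : Option (Int × Int) :=
  lpFindInRows letter (PySem.List.enumerate board).reverse

def locate_players_alt (board_layout : List (List String)) : (Int × Int) × (List (Int × Int)) :=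
  let p := lpFindLast 'P' board_layout
  let ghosts := (['W', 'X', 'Y', 'Z'] : List Char).map (fun g => lpFindLast g board_layout)
  (p.getD (0, 0), ghosts.filterMap id)

-- ===== PRECONDITION & SPEC =====
-- Pre_ excludes boards containing an empty cell: there 'cell[0]' raises IndexError in A.
def Pre_locate_players (board_layout : List (List String)) : Prop :=
  board_layout.all (fun row => row.all (fun cell => cell ≠ "")) = true
instance (board_layout : List (List String)) : Decidable (Pre_locate_players board_layout) := by
  unfold Pre_locate_players; infer_instance

def pvWitness_locate_players : List (List String) := [["P", "W"], [".", "X"]]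

def Spec_locate_players (board_layout : List (List String)) (out : (Int × Int) × (List (Int × Int))) : Prop := out = locate_players_alt board_layout
instance (board_layout : List (List String)) (out : (Int × Int) × (List (Int × Int))) : Decidable (Spec_locate_players board_layout out) := by unfold Spec_locate_players; infer_instance

-- ===== CLAIM (what is proved, stated in full; the proofs are below) =====
def Claim_equal_locate_players : Prop := ∀ (board_layout : List (List String)), Dom_locate_players board_layout → Pre_locate_players board_layout → Spec_locate_players board_layout (locate_players board_layout)

-- ===== LEMMAS AND PROOFS =====

-- the board flattened into traversal-order items (row, col, cell)
def lpItemsOf (rp : Int × List String) : List (Int × Int × String) :=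
  (PySem.List.enumerate rp.2).map (fun cp => (rp.1, cp.1, cp.2))

def lpItems (board : List (List String)) : List (Int × Int × String) :=
  (PySem.List.enumerate board).flatMap lpItemsOf

-- per-letter update: the effect of one item on the slot tracked for that letter
def lpUpd (L : Char) (x : Int × Int) (it : Int × Int × String) : Int × Int :=
  if lpCell it.2.2 = L then (it.1, it.2.1) else x

-- first match of a letter in an item list
def lpFF (L : Char) : List (Int × Int × String) → Option (Int × Int)
  | [] => none
  | it :: tl => if lpCell it.2.2 = L then some (it.1, it.2.1) else lpFF L tl

def lpStepA' (st : (Int × Int) × List (Int × Int)) (it : Int × Int × String) :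
    (Int × Int) × List (Int × Int) :=
  lpStepA it.1 st (it.2.1, it.2.2)

theorem gm_contains (c : Char) : lpGhostMap.contains c = true ↔ c = 'W' ∨ c = 'X' ∨ c = 'Y' ∨ c = 'Z' := by
  have h : lpGhostMap = PySem.Dict.mk [('W', 0), ('X', 1), ('Y', 2), ('Z', 3)] := by decide
  rw [h]; simp; tauto

-- one A-step acts componentwise: pacman and each of the four slots
theorem stepA_decomp (it : Int × Int × String) (p a b c d : Int × Int) :
    lpStepA' (p, [a, b, c, d]) it =
      (lpUpd 'P' p it, [lpUpd 'W' a it, lpUpd 'X' b it, lpUpd 'Y' c it, lpUpd 'Z' d it]) := by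
  obtain ⟨r, i, cell⟩ := it
  simp only [lpStepA', lpStepA, lpUpd]
  by_cases hP : lpCell cell = 'P'
  · have hcon : lpGhostMap.contains 'P' = false := by decide
    simp [hP, hcon]
  · by_cases hg : lpCell cell = 'W' ∨ lpCell cell = 'X' ∨ lpCell cell = 'Y' ∨ lpCell cell = 'Z'
    · rcases hg with h | h | h | h <;>
        simp [h, (by decide : lpGhostMap.contains 'W' = true),
          (by decide : lpGhostMap.contains 'X' = true),
          (by decide : lpGhostMap.contains 'Y' = true),
          (by decide : lpGhostMap.contains 'Z' = true),
          (by decide : lpGhostMap.getD 'W' 0 = 0), (by decide : lpGhostMap.getD 'X' 0 = 1),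
          (by decide : lpGhostMap.getD 'Y' 0 = 2), (by decide : lpGhostMap.getD 'Z' 0 = 3),
          PySem.List.pySetD, PySem.List.pySet?, PySem.List.pyIdx?]
    · have hcon : lpGhostMap.contains (lpCell cell) = false := by
        rcases h : lpGhostMap.contains (lpCell cell) with _|_
        · rfl
        · exact absurd ((gm_contains _).mp h) hg
      obtain ⟨h1, h2, h3, h4⟩ : lpCell cell ≠ 'W' ∧ lpCell cell ≠ 'X' ∧ lpCell cell ≠ 'Y' ∧ lpCell cell ≠ 'Z' := by tauto
      simp [hP, hcon, h1, h2, h3, h4]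

-- the whole A-fold acts componentwise
theorem foldA_decomp (its : List (Int × Int × String)) (p a b c d : Int × Int) :
    its.foldl lpStepA' (p, [a, b, c, d]) =
      (its.foldl (lpUpd 'P') p,
        [its.foldl (lpUpd 'W') a, its.foldl (lpUpd 'X') b,
         its.foldl (lpUpd 'Y') c, its.foldl (lpUpd 'Z') d]) := by
  induction its generalizing p a b c d with
  | nil => rfl
  | cons it tl ih => rw [List.foldl_cons, stepA_decomp, ih]; rfl

-- A's nested fold is the fold over the flattened items
theorem foldA_flatten (rows : List (Int × List String)) (st : (Int × Int) × List (Int × Int)) :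
    rows.foldl (fun st rp => (PySem.List.enumerate rp.2).foldl (lpStepA rp.1) st) st =
      (rows.flatMap lpItemsOf).foldl lpStepA' st := by
  induction rows generalizing st with
  | nil => rfl
  | cons rp tl ih =>
    rw [List.foldl_cons, List.flatMap_cons, List.foldl_append, ← ih]
    congr 1
    simp only [lpItemsOf, List.foldl_map, lpStepA']

-- folding the per-letter update = first match of the reversed list, else the start value
theorem foldl_upd_eq (L : Char) (x : Int × Int) (its : List (Int × Int × String)) :
    its.foldl (lpUpd L) x = (lpFF L its.reverse).getD x := by
  induction its using List.reverseRecOn generalizing x with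
  | nil => rfl
  | append_singleton l e ih =>
    rw [List.foldl_append, List.reverse_append]
    simp only [List.foldl_cons, List.foldl_nil, List.reverse_singleton, List.singleton_append, lpFF]
    by_cases h : lpCell e.2.2 = L
    · simp [lpUpd, h]
    · simp [lpUpd, h, ih]

theorem lpFF_append (L : Char) (l1 l2 : List (Int × Int × String)) :
    lpFF L (l1 ++ l2) = match lpFF L l1 with
      | some p => some p
      | none => lpFF L l2 := by
  induction l1 with
  | nil => rfl
  | cons it tl ih =>
    simp only [List.cons_append, lpFF, ih]
    by_cases h : lpCell it.2.2 = L <;> simp [h]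

theorem findInRow_eq (L : Char) (r : Int) (cps : List (Int × String)) :
    lpFindInRow L r cps = lpFF L (cps.map (fun cp => (r, cp.1, cp.2))) := by
  induction cps with
  | nil => rfl
  | cons cp tl ih =>
    obtain ⟨c, cell⟩ := cp
    simp only [List.map_cons, lpFindInRow, lpFF, ih]

theorem findInRows_eq (L : Char) (rows : List (Int × List String)) :
    lpFindInRows L rows = lpFF L (rows.flatMap (fun rp => (lpItemsOf rp).reverse)) := by
  induction rows with
  | nil => rfl
  | cons rp tl ih =>
    obtain ⟨r, row⟩ := rp
    simp only [lpFindInRows, List.flatMap_cons, lpFF_append, findInRow_eq, ih, lpItemsOf,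
      List.map_reverse]

-- B's find_last is the first match in the reversed flattened items
theorem findLast_eq (L : Char) (board : List (List String)) :
    lpFindLast L board = lpFF L (lpItems board).reverse := by
  rw [lpFindLast, findInRows_eq, lpItems, List.reverse_flatMap]
  rfl

-- whatever lpFF finds has a nonnegative row index when the items come from the board
theorem lpFF_mem (L : Char) (its : List (Int × Int × String)) (p : Int × Int)
    (h : lpFF L its = some p) : ∃ it ∈ its, p = (it.1, it.2.1) := by
  induction its with
  | nil => exact absurd h (by simp [lpFF])
  | cons it tl ih =>
    simp only [lpFF] at h
    by_cases hm : lpCell it.2.2 = L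
    · rw [if_pos hm] at h
      exact ⟨it, by simp, by cases h; rfl⟩
    · rw [if_neg hm] at h
      obtain ⟨it', h1, h2⟩ := ih h
      exact ⟨it', by simp [h1], h2⟩

theorem items_row_nonneg (board : List (List String)) (it : Int × Int × String)
    (h : it ∈ lpItems board) : 0 ≤ it.1 := by
  simp only [lpItems, List.mem_flatMap] at h
  obtain ⟨rp, hrp, hit⟩ := h
  rw [PySem.List.mem_enumerate_iff] at hrp
  obtain ⟨k, hk, rfl⟩ := hrp
  simp only [lpItemsOf, List.mem_map] at hit
  obtain ⟨cp, _, rfl⟩ := hit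
  simp

theorem filter_ne_erase (a : Int × Int) (l : List (Int × Int)) :
    (l.erase a).filter (fun p => p ≠ a) = l.filter (fun p => p ≠ a) := by
  induction l with
  | nil => rfl
  | cons x tl ih =>
    by_cases hx : x = a
    · subst hx; simp [List.erase_cons_head]
    · rw [List.erase_cons_tail (by simpa using hx)]
      simp only [List.filter_cons]
      rw [ih]

theorem removeLoop_filter (l : List (Int × Int)) :
    lpRemoveLoop l = l.filter (fun p => p ≠ (-1, -1)) := by
  fun_induction lpRemoveLoop l with
  | case1 l h ih => rw [ih, filter_ne_erase]
  | case2 l h =>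
    rw [List.filter_eq_self.mpr]
    intro a ha
    simp
    rintro rfl
    exact h ha

-- sentinel defaults filtered out = the found options kept
theorem final_rel (os : List (Option (Int × Int)))
    (h : ∀ o ∈ os, ∀ v, o = some v → 0 ≤ v.1) :
    (os.map (fun o => o.getD (-1, -1))).filter (fun p => p ≠ (-1, -1)) = os.filterMap id := by
  induction os with
  | nil => rfl
  | cons o tl ih =>
    have ih' := ih (fun o ho => h o (by simp [ho]))
    rcases ho : o with _ | v
    · simp only [List.map_cons, Option.getD_none, List.filter_cons]
      norm_num
      simpa using ih'
    · have hv : v ≠ ((-1 : Int), (-1 : Int)) := by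
        intro e
        have := h o (by simp) v (by rw [ho])
        rw [e] at this
        norm_num at this
      simp only [List.map_cons, Option.getD_some, List.filter_cons]
      simp only [hv, ne_eq, decide_not, not_false_eq_true]
      simp only [List.filterMap_cons, id]
      norm_num
      simpa using ih'

-- ===== VERDICT (by name: the statement is the Claim_ definition above) =====
theorem locate_players_spec : Claim_equal_locate_players := by
  intro board _ _
  unfold Spec_locate_players locate_players locate_players_alt
  rw [foldA_flatten, ← lpItems, foldA_decomp]
  simp only
  have hff : ∀ L : Char, ∀ x : Int × Int,
      (lpItems board).foldl (lpUpd L) x = (lpFindLast L board).getD x := by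
    intro L x
    rw [foldl_upd_eq, findLast_eq]
  have hg : ∀ L : Char, ∀ v, lpFindLast L board = some v → 0 ≤ v.1 := by
    intro L v hv
    rw [findLast_eq] at hv
    obtain ⟨it, hit, rfl⟩ := lpFF_mem L _ _ hv
    exact items_row_nonneg board it (List.mem_reverse.mp hit)
  refine Prod.ext (by simpa using hff 'P' (0, 0)) ?_
  simp only [hff, removeLoop_filter]
  have := final_rel [lpFindLast 'W' board, lpFindLast 'X' board, lpFindLast 'Y' board,
      lpFindLast 'Z' board] (by
    intro o ho v hv
    simp only [List.mem_cons, List.not_mem_nil, or_false] at ho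
    rcases ho with rfl | rfl | rfl | rfl <;> exact hg _ v hv)
  simpa using this
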